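-- pv_equiv track=rewrite | github.com/volynvlad/comp_geom | MathHelper.py | point_min
-- ===== SOURCE A (Python) =====
-- def point_min(p):
--     """
--     :param p: points
--     :return: max by x and if needed min by y
--     """
--     minimum = p[0]
--     for i in range(len(p)):
--         if minimum[1] == p[i][1] and minimum[0] > p[i][0]:
--             minimum = p[i]
--         if minimum[1] <= p[i][1]:
--             minimum = p[i]
--     return minimum
-- ===== SOURCE B (Python) =====
-- def point_min(p):
--     """
--     :param p: points
--     :return: max by x and if needed min by y
--     """
--     return sorted(p, key=lambda pt: pt[1])[-1]
-- ===== Notes on version B (the rewrite author's own statement) =====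
-- stated objective: simpler
-- what changed: Replaces the two-branch running scan (whose x-comparison branch is vacuous) with a stable sort by y followed by taking the last element, which is the last point of maximum y.
import Mathlib
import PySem

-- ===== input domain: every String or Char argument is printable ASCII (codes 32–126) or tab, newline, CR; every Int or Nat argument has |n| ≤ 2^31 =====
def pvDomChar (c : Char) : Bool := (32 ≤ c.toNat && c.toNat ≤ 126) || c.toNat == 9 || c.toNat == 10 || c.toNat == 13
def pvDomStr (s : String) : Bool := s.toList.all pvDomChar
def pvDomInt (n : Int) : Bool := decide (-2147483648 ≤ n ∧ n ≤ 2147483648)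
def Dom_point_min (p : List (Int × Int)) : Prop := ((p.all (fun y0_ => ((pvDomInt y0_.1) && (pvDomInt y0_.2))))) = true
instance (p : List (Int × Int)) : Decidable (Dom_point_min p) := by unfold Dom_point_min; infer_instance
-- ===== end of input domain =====

-- B replaces A's two-branch running scan by a stable sort on y then taking the last element (simpler, not faster).

-- ===== PORT A =====
def point_min (p : List (Int × Int)) : Int × Int :=
  match p with
  | [] => (0, 0)  -- p[0] raises IndexError on []; excluded by Pre_point_min
  | q0 :: _ =>
    (PySem.List.pyRange 0 (p.length : Int) 1).foldl
      (fun minimum i =>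
        let pi := PySem.List.pyGetD p i (0, 0)
        let m1 := if minimum.2 = pi.2 ∧ minimum.1 > pi.1 then pi else minimum
        if m1.2 ≤ pi.2 then pi else m1) q0

-- ===== PORT B =====
def point_min_alt (p : List (Int × Int)) : Int × Int :=
  PySem.List.pyGetD (PySem.List.sorted p (fun pt => pt.2)) (-1) (0, 0)  -- [-1] raises IndexError on []; excluded by Pre_point_min

-- ===== PRECONDITION & SPEC =====
-- A evaluates p[0], which raises IndexError on the empty list; only that input is excluded.
def Pre_point_min (p : List (Int × Int)) : Prop := p ≠ []
instance (p : List (Int × Int)) : Decidable (Pre_point_min p) := by unfold Pre_point_min; infer_instance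
def pvWitness_point_min : (List (Int × Int)) := ([((0 : Int), (0 : Int))])

def Spec_point_min (p : List (Int × Int)) (out : Int × Int) : Prop := out = point_min_alt p
instance (p : List (Int × Int)) (out : Int × Int) : Decidable (Spec_point_min p out) := by unfold Spec_point_min; infer_instance

-- ===== CLAIM (what is proved, stated in full; the proofs are below) =====
def Claim_equal_point_min : Prop := ∀ (p : List (Int × Int)), Dom_point_min p → Pre_point_min p → Spec_point_min p (point_min p)

-- ===== LEMMAS AND PROOFS =====

-- the effective step of A's loop: keep the later point whenever its y is ≥ the current one
def gstep (m x : Int × Int) : Int × Int := if m.2 ≤ x.2 then x else m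

lemma gstep_self (x : Int × Int) : gstep x x = x := by simp [gstep]

-- A's loop body equals gstep: when the first branch fires, minimum.2 = pi.2 so the second branch fires too
lemma bodyA_eq (p : List (Int × Int)) :
    (fun (minimum : Int × Int) (i : Int) =>
      let pi := PySem.List.pyGetD p i (0, 0)
      let m1 := if minimum.2 = pi.2 ∧ minimum.1 > pi.1 then pi else minimum
      if m1.2 ≤ pi.2 then pi else m1)
    = (fun (minimum : Int × Int) (i : Int) => gstep minimum (PySem.List.pyGetD p i (0, 0))) := by
  funext m i
  set x := PySem.List.pyGetD p i (0, 0) with hx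
  by_cases h : m.2 = x.2 <;> by_cases h2 : m.1 > x.1 <;>
    simp [gstep, h, h2]

lemma insertBy_cons_pos {before : (Int × Int) → (Int × Int) → Bool} {x y : Int × Int}
    {ys : List (Int × Int)} (h : before x y = true) :
    PySem.List.insertBy before x (y :: ys) = x :: y :: ys := by
  simp [PySem.List.insertBy, h]

lemma insertBy_cons_neg {before : (Int × Int) → (Int × Int) → Bool} {x y : Int × Int}
    {ys : List (Int × Int)} (h : before x y = false) :
    PySem.List.insertBy before x (y :: ys) = y :: PySem.List.insertBy before x ys := by
  simp [PySem.List.insertBy, h]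

-- last element of a stable insert into a y-sorted list
lemma lastIns (x : Int × Int) :
    ∀ (acc : List (Int × Int)), acc.Pairwise (fun a b => a.2 ≤ b.2) →
    ∀ m, acc.getLast? = some m →
    (PySem.List.insertBy (fun a b => decide (a.2 < b.2)) x acc).getLast?
      = some (if x.2 < m.2 then m else x) := by
  intro acc
  induction acc with
  | nil => intro _ m hm; simp at hm
  | cons y ys ih =>
    intro hp m hm
    have hy : ∀ b ∈ ys, y.2 ≤ b.2 := by
      intro b hb; exact (List.pairwise_cons.mp hp).1 b hb
    by_cases hc : x.2 < y.2
    · -- inserted before y: last unchanged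
      have hym : y.2 ≤ m.2 := by
        rcases List.mem_cons.mp (List.mem_of_getLast? hm) with h | h
        · simp [h]
        · exact hy m h
      rw [insertBy_cons_pos (by simpa using hc), List.getLast?_cons_cons, hm, if_pos (by omega)]
    · rw [insertBy_cons_neg (by simpa using hc)]
      cases ys with
      | nil =>
        have hm' : m = y := by simpa using hm.symm
        subst hm'
        simp [PySem.List.insertBy, if_neg hc]
      | cons z ys' =>
        have hm' : (z :: ys').getLast? = some m := by
          simpa [List.getLast?_cons_cons] using hm
        have hrec := ih (List.pairwise_cons.mp hp).2 m hm'
        have hne : PySem.List.insertBy (fun a b => decide (a.2 < b.2)) x (z :: ys') ≠ [] := by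
          intro h
          have : x ∈ PySem.List.insertBy (fun a b => decide (a.2 < b.2)) x (z :: ys') :=
            (PySem.List.mem_insertBy _ _ _ _).mpr (Or.inl rfl)
          simp [h] at this
        rcases List.exists_cons_of_ne_nil hne with ⟨w, ws, hw⟩
        rw [hw, List.getLast?_cons_cons, ← hw, hrec]

-- last of the stable y-sort is A's running fold
lemma sorted_last (x : Int × Int) (t : List (Int × Int)) :
    (PySem.List.sorted (x :: t) (fun pt => pt.2)).getLast? = some (t.foldl gstep x) := by
  induction t using List.reverseRecOn with
  | nil =>
    simp [PySem.List.sorted_eq_foldl_insertBy, PySem.List.insertBy]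
  | append_singleton t' y ih =>
    have hs : PySem.List.sorted (x :: (t' ++ [y])) (fun pt => pt.2)
        = PySem.List.insertBy (fun a b => decide (a.2 < b.2)) y
            (PySem.List.sorted (x :: t') (fun pt => pt.2)) := by
      rw [PySem.List.sorted_eq_foldl_insertBy, PySem.List.sorted_eq_foldl_insertBy,
        show x :: (t' ++ [y]) = (x :: t') ++ [y] by simp, List.foldl_append]
      simp
    rw [hs, lastIns y _ (PySem.List.sorted_pairwise _ _) _ ih, List.foldl_append]
    simp only [List.foldl_cons, List.foldl_nil]
    by_cases h : (t'.foldl gstep x).2 ≤ y.2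
    · rw [if_neg (by omega)]; simp [gstep, h]
    · rw [if_pos (by omega)]; simp [gstep, h]

-- ===== VERDICT (by name: the statement is the Claim_ definition above) =====
theorem point_min_spec : Claim_equal_point_min := by
  intro p _ hpre
  unfold Spec_point_min
  cases p with
  | nil => exact absurd rfl hpre
  | cons q0 t =>
    have hA : point_min (q0 :: t) = t.foldl gstep q0 := by
      show (PySem.List.pyRange 0 ((q0 :: t).length : Int) 1).foldl
        (fun minimum i =>
          let pi := PySem.List.pyGetD (q0 :: t) i (0, 0)
          let m1 := if minimum.2 = pi.2 ∧ minimum.1 > pi.1 then pi else minimum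
          if m1.2 ≤ pi.2 then pi else m1) q0 = t.foldl gstep q0
      rw [bodyA_eq, PySem.List.foldl_pyRange_zero_pyGetD' (q0 :: t) (0, 0) gstep q0,
        List.foldl_cons, gstep_self]
    have hne : PySem.List.sorted (q0 :: t) (fun pt => pt.2) ≠ [] := by
      intro h
      exact absurd ((PySem.List.sorted_eq_nil_iff _ _ _).mp h) (by simp)
    have hB : point_min_alt (q0 :: t) = t.foldl gstep q0 := by
      unfold point_min_alt
      rw [PySem.List.pyGetD_neg_one _ _ hne]
      have hlast := sorted_last q0 t
      rw [List.getLast?_eq_some_getLast hne] at hlast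
      exact Option.some.inj hlast
    rw [hA, hB]
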